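-- pv_equiv track=rewrite | github.com/kibrq/RSE-classroom | Reqved/210317/part2/ex2/solution.py | solve
-- ===== SOURCE A (Python) =====
-- def solve(n, a):
--     R, biggestNotDiv7, biggestDiv7 = 1, 0, 0
--     for element in a:
--         if element % 7 == 0:
--             R = max(R, element * biggestNotDiv7)
--             biggestDiv7 = max(element, biggestDiv7)
--             continue
--         R = max(R, element * biggestDiv7)
--         biggestNotDiv7 = max(element, biggestNotDiv7)
--
--     return R
-- ===== SOURCE B (Python) =====
-- def solve(n, a):
--     max_div = max([0] + [x for x in a if x % 7 == 0])
--     max_non = max([0] + [x for x in a if x % 7 != 0])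
--     return max(1, max_div * max_non)
-- ===== Notes on version B (the rewrite author's own statement) =====
-- stated objective: simpler
-- what changed: Replaces the running cross-product scan (R updated with element*other-category-max at every step) by two independent clamped category maxima combined once at the end with max(1, max_div*max_non).
import Mathlib
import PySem

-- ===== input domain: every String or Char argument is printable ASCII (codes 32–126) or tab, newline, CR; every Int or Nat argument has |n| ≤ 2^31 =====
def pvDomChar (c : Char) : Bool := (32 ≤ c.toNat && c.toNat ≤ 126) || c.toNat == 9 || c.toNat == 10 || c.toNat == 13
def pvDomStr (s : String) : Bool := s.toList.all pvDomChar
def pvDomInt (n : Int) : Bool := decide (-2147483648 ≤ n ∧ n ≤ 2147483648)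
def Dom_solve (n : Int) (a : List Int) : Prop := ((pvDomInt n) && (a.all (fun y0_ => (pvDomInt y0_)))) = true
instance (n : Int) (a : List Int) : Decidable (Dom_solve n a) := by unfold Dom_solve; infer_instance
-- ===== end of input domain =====

-- B replaces A's running cross-product scan by two clamped category maxima combined once at the end (simpler).


-- ===== PORT A =====
def solve (n : Int) (a : List Int) : Int :=
  let s := a.foldl (fun (st : Int × Int × Int) element =>
    let R := st.1
    let biggestNotDiv7 := st.2.1
    let biggestDiv7 := st.2.2
    if PySem.Int.mod element 7 == 0 then
      (max R (element * biggestNotDiv7), biggestNotDiv7, max element biggestDiv7)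
    else
      (max R (element * biggestDiv7), max element biggestNotDiv7, biggestDiv7))
    (1, 0, 0)
  s.1

-- ===== PORT B =====
def solve_alt (n : Int) (a : List Int) : Int :=
  let max_div := (PySem.List.max? (0 :: a.filter (fun x => PySem.Int.mod x 7 == 0)) (fun y => y)).getD 0
  let max_non := (PySem.List.max? (0 :: a.filter (fun x => !(PySem.Int.mod x 7 == 0))) (fun y => y)).getD 0
  max 1 (max_div * max_non)

-- ===== PRECONDITION & SPEC =====
def Spec_solve (n : Int) (a : List Int) (out : Int) : Prop := out = solve_alt n a
instance (n : Int) (a : List Int) (out : Int) : Decidable (Spec_solve n a out) := by unfold Spec_solve; infer_instance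

-- ===== CLAIM (what is proved, stated in full; the proofs are below) =====
def Claim_equal_solve : Prop := ∀ (n : Int) (a : List Int), Dom_solve n a → Spec_solve n a (solve n a)

-- ===== LEMMAS AND PROOFS =====

def stepA (st : Int × Int × Int) (element : Int) : Int × Int × Int :=
  let R := st.1
  let biggestNotDiv7 := st.2.1
  let biggestDiv7 := st.2.2
  if PySem.Int.mod element 7 == 0 then
    (max R (element * biggestNotDiv7), biggestNotDiv7, max element biggestDiv7)
  else
    (max R (element * biggestDiv7), max element biggestNotDiv7, biggestDiv7)

theorem solve_eq_foldl (n : Int) (a : List Int) :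
    solve n a = (a.foldl stepA (1, 0, 0)).1 := rfl

-- the invariant: with clamped category maxima nB, dB and R = max 1 (nB*dB), the loop ends at
-- max 1 (finalNon * finalDiv)
theorem loop_inv (a : List Int) :
    ∀ (nB dB : Int), 0 ≤ nB → 0 ≤ dB →
      (a.foldl stepA (max 1 (nB * dB), nB, dB)).1 =
        max 1 (((a.filter (fun x => !(PySem.Int.mod x 7 == 0))).foldl max nB) *
               ((a.filter (fun x => PySem.Int.mod x 7 == 0)).foldl max dB)) := by
  induction a with
  | nil => intro nB dB _ _; simp
  | cons e t ih =>
    intro nB dB hn hd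
    by_cases hp : (PySem.Int.mod e 7 == 0) = true
    · have h1 : max (max 1 (nB * dB)) (e * nB) = max 1 (nB * max e dB) := by
        rcases le_total e dB with h | h
        · rw [max_eq_right h]
          have : e * nB ≤ nB * dB := by nlinarith
          rw [max_assoc, max_eq_left this]
        · rw [max_eq_left h, max_assoc, mul_comm e nB, max_eq_right (by nlinarith : nB * dB ≤ nB * e)]
      have hd' : 0 ≤ max e dB := le_trans hd (le_max_right _ _)
      simp only [List.foldl_cons, List.filter_cons, stepA, hp, if_pos, Bool.not_true, h1]
      rw [show max dB e = max e dB from max_comm dB e] at *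
      simpa using ih nB (max e dB) hn hd'
    · have hpb : (PySem.Int.mod e 7 == 0) = false := by
        cases h : (PySem.Int.mod e 7 == 0) <;> simp_all
      have h1 : max (max 1 (nB * dB)) (e * dB) = max 1 (max e nB * dB) := by
        rcases le_total e nB with h | h
        · rw [max_eq_right h]
          have : e * dB ≤ nB * dB := by nlinarith
          rw [max_assoc, max_eq_left this]
        · rw [max_eq_left h, max_assoc, max_eq_right (by nlinarith : nB * dB ≤ e * dB)]
      have hn' : 0 ≤ max e nB := le_trans hn (le_max_right _ _)
      simp only [List.foldl_cons, List.filter_cons, stepA, hpb, Bool.not_false, Bool.false_eq_true, if_false, if_true, h1]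
      rw [show max nB e = max e nB from max_comm nB e] at *
      simpa using ih (max e nB) dB hn' hd

-- ===== VERDICT (by name: the statement is the Claim_ definition above) =====
theorem solve_spec : Claim_equal_solve := by
  intro n a _
  show solve n a = solve_alt n a
  rw [solve_eq_foldl]
  have := loop_inv a 0 0 le_rfl le_rfl
  simp only [mul_zero, max_eq_left (by norm_num : (0:Int) ≤ 1)] at this
  rw [this]
  simp [solve_alt, PySem.List.max?_id_cons, mul_comm]
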